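-- pv_equiv track=rewrite | github.com/TingYulq/- | 牛客网/GraphBianLi.py | function
-- ===== SOURCE A (Python) =====
-- from collections import defaultdict,deque
--
-- def function(N,lists):
--     graph=lists
--     visited=set([1])
--     queue=deque()
--     queue.append((1,0))
--     max_depth=0
--     while queue: #求图最大深度
--         cur_node,depth=queue.popleft()
--         max_depth=max(max_depth,depth)
--         for child in graph[cur_node]:
--             if child not in visited:
--                 visited.add(child)
--                 queue.append((child,depth+1))
--     return 2*(N-1)-max_depth
-- ===== SOURCE B (Python) =====
-- def function(N, lists):
--     # Kleene-style fixpoint saturation: repeatedly rescan the whole reached set,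
--     # adding every newly reachable neighbour, counting rounds until stabilisation.
--     reached = {1}
--     depth = 0
--     while True:
--         new = set()
--         for u in reached:
--             for v in lists[u]:
--                 if v not in reached and v not in new:
--                     new.add(v)
--         if not new:
--             break
--         reached |= new
--         depth += 1
--     return 2 * (N - 1) - depth
-- ===== Notes on version B (the rewrite author's own statement) =====
-- stated objective: alternative
-- what changed: Replaces the BFS queue entirely with a Kleene-style fixpoint saturation: each round rescans the whole reached set and collects every newly reachable neighbour, counting rounds until the set stabilises - no queue, no frontier, no per-node depth tags.
-- outside the precondition, e.g. on function(1, {1: [], 3: [2], 2: [5]}): A returns 0, B returns 0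
import Mathlib
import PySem

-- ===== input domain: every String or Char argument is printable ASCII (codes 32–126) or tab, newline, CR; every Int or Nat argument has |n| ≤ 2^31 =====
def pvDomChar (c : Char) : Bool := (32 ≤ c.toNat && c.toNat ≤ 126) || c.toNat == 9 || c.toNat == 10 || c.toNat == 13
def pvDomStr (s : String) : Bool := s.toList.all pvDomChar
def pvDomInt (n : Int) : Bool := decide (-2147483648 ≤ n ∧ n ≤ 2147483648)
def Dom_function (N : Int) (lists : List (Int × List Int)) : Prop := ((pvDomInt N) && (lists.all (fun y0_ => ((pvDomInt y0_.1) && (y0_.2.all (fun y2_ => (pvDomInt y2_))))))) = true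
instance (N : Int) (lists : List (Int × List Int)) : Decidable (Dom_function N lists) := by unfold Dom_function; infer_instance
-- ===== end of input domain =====

-- B replaces A's depth-tagged BFS queue with a queue-free fixpoint saturation of the
-- reached set, counting rounds until it stabilises; same value, no speed claim.

-- ===== PORT A =====
-- A's while loop over the deque of (node, depth) pairs; fuel is only a totality
-- guard (proved never to run out inside the equivalence proof below); on the
-- excluded KeyError inputs the lookup uses default [] (Python A raises there).
def functionLoopA (g : PySem.Dict Int (List Int)) :
    Nat → List (Int × Int) → PySem.Set Int → Int → Int
  | 0, _, _, m => m
  | _ + 1, [], _, m => m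
  | f + 1, (x, d) :: q, v, m =>
      let m' := max m d
      let s := (PySem.Dict.getD g x []).foldl
        (fun (s : List (Int × Int) × PySem.Set Int) c =>
          if PySem.Set.contains s.2 c then s
          else (s.1 ++ [(c, d + 1)], PySem.Set.add s.2 c)) (q, v)
      functionLoopA g f s.1 s.2 m'

def function (N : Int) (lists : List (Int × List Int)) : Int :=
  let fuel := 1 + 2 * (lists.flatMap Prod.snd).length
  2 * (N - 1) - functionLoopA (PySem.Dict.mk lists) fuel [(1, 0)] (PySem.Set.ofList [1]) 0

-- ===== PORT B =====
-- one saturation round: scan the whole reached set, collect the neighbours seen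
-- for the first time (Python's `new` set)
def stepSat (g : PySem.Dict Int (List Int)) (r : PySem.Set Int) : PySem.Set Int :=
  r.foldl (fun new u =>
    (PySem.Dict.getD g u []).foldl (fun new c =>
      if PySem.Set.contains r c || PySem.Set.contains new c then new
      else PySem.Set.add new c) new) PySem.Set.empty

-- B's `while True` loop: stop when a round adds nothing, else absorb the new
-- elements and bump the round counter; fuel is only a totality guard.
def satLoop (g : PySem.Dict Int (List Int)) : Nat → PySem.Set Int → Int → Int
  | 0, _, d => d
  | f + 1, r, d =>
      let nw := stepSat g r
      if nw.isEmpty then d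
      else satLoop g f (PySem.Set.union r nw) (d + 1)

def function_alt (N : Int) (lists : List (Int × List Int)) : Int :=
  let fuel := 1 + 2 * (lists.flatMap Prod.snd).length
  2 * (N - 1) - satLoop (PySem.Dict.mk lists) fuel (PySem.Set.ofList [1]) 0

-- ===== PRECONDITION & SPEC =====
-- Python A raises KeyError when the BFS dequeues a node that is not a dict key
-- (B raises on the same reached nodes). Pre_ is the closed-form sufficient
-- guarantee: node 1 is a key, and every key that could be reached (it is 1 or is
-- listed as somebody's neighbour) lists only keys as neighbours; this still
-- excludes some inputs on which A returns (a non-key neighbour under a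
-- referenced-but-unreachable key — see the cite in claim.json); duplicate keys
-- cannot arise from a Python dict and are excluded so the association list
-- determines the dict.
def Pre_function (N : Int) (lists : List (Int × List Int)) : Prop :=
  1 ∈ lists.map Prod.fst ∧
  (∀ p ∈ lists, (p.1 = 1 ∨ p.1 ∈ lists.flatMap Prod.snd) → ∀ c ∈ p.2, c ∈ lists.map Prod.fst) ∧
  (lists.map Prod.fst).Nodup

instance (N : Int) (lists : List (Int × List Int)) : Decidable (Pre_function N lists) := by
  unfold Pre_function; infer_instance

def pvWitness_function : Int × (List (Int × List Int)) := (2, [(1, [2]), (2, [1])])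

def Spec_function (N : Int) (lists : List (Int × List Int)) (out : Int) : Prop := out = function_alt N lists
instance (N : Int) (lists : List (Int × List Int)) (out : Int) : Decidable (Spec_function N lists out) := by unfold Spec_function; infer_instance

-- ===== CLAIM (what is proved, stated in full; the proofs are below) =====
def Claim_equal_function : Prop := ∀ (N : Int) (lists : List (Int × List Int)), Dom_function N lists → Pre_function N lists → Spec_function N lists (function N lists)

-- ===== LEMMAS AND PROOFS =====

-- proof-side intermediate: layered BFS (frontier + level counter), the bridge
-- between A's depth-tagged queue and B's saturation rounds
def pvLayered (g : PySem.Dict Int (List Int)) :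
    Nat → List Int → List Int → PySem.Set Int → Int → Int
  | 0, _, _, _, d => d
  | f + 1, [], nxt, v, d =>
      match nxt with
      | [] => d
      | y :: ys => pvLayered g (f + 1) (y :: ys) [] v (d + 1)
  | f + 1, x :: rest, nxt, v, d =>
      let s := (PySem.Dict.getD g x []).foldl
        (fun (s : List Int × PySem.Set Int) c =>
          if PySem.Set.contains s.2 c then s
          else (s.1 ++ [c], PySem.Set.add s.2 c)) (nxt, v)
      pvLayered g f rest s.1 s.2 d
  termination_by f frontier _ _ _ => (f, if frontier.isEmpty then 1 else 0)

-- the common core of the child folds: the genuinely new children, in order, and the new visited set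
def pvNewKids (cs : List Int) (v : PySem.Set Int) : List Int × PySem.Set Int :=
  cs.foldl (fun s c => if PySem.Set.contains s.2 c then s else (s.1 ++ [c], PySem.Set.add s.2 c)) ([], v)

theorem pvNewKids_cons_mem (c : Int) (cs : List Int) (v : PySem.Set Int)
    (h : PySem.Set.contains v c = true) :
    pvNewKids (c :: cs) v = pvNewKids cs v := by
  simp only [pvNewKids, List.foldl_cons, h, if_true]

theorem pvFoldB (cs : List Int) (nxt : List Int) (v : PySem.Set Int) :
    cs.foldl (fun (s : List Int × PySem.Set Int) c =>
        if PySem.Set.contains s.2 c then s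
        else (s.1 ++ [c], PySem.Set.add s.2 c)) (nxt, v)
    = (nxt ++ (pvNewKids cs v).1, (pvNewKids cs v).2) := by
  induction cs generalizing nxt v with
  | nil => simp [pvNewKids]
  | cons c cs ih =>
      rw [List.foldl_cons]
      by_cases h : PySem.Set.contains v c = true
      · simp only [h, if_true]
        rw [ih nxt v, pvNewKids_cons_mem c cs v h]
      · have h' : PySem.Set.contains v c = false := eq_false_of_ne_true h
        have hrhs : pvNewKids (c :: cs) v
            = ([c] ++ (pvNewKids cs (PySem.Set.add v c)).1, (pvNewKids cs (PySem.Set.add v c)).2) := by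
          simp only [pvNewKids, List.foldl_cons, h', Bool.false_eq_true, if_false, List.nil_append]
          exact ih [c] (PySem.Set.add v c)
        simp only [h', Bool.false_eq_true, if_false]
        rw [ih (nxt ++ [c]) (PySem.Set.add v c), hrhs]
        simp [List.append_assoc]

theorem pvFoldA (cs : List Int) (q : List (Int × Int)) (v : PySem.Set Int) (d : Int) :
    cs.foldl (fun (s : List (Int × Int) × PySem.Set Int) c =>
        if PySem.Set.contains s.2 c then s
        else (s.1 ++ [(c, d + 1)], PySem.Set.add s.2 c)) (q, v)
    = (q ++ ((pvNewKids cs v).1).map (fun c => (c, d + 1)), (pvNewKids cs v).2) := by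
  induction cs generalizing q v with
  | nil => simp [pvNewKids]
  | cons c cs ih =>
      rw [List.foldl_cons]
      by_cases h : PySem.Set.contains v c = true
      · simp only [h, if_true]
        rw [ih q v, pvNewKids_cons_mem c cs v h]
      · have h' : PySem.Set.contains v c = false := eq_false_of_ne_true h
        have hrhs : pvNewKids (c :: cs) v
            = ([c] ++ (pvNewKids cs (PySem.Set.add v c)).1, (pvNewKids cs (PySem.Set.add v c)).2) := by
          simp only [pvNewKids, List.foldl_cons, h', Bool.false_eq_true, if_false, List.nil_append]
          exact pvFoldB cs [c] (PySem.Set.add v c)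
        simp only [h', Bool.false_eq_true, if_false]
        rw [ih (q ++ [(c, d + 1)]) (PySem.Set.add v c), hrhs]
        simp [List.append_assoc]

-- unvisited candidate count: the potential that pays for every enqueue
def pvUnvis (C : List Int) (v : PySem.Set Int) : Nat :=
  (C.filter (fun c => !(PySem.Set.contains v c))).length

theorem pvFilter_mono (C : List Int) (p q : Int → Bool) (h : ∀ a, q a = true → p a = true) :
    (C.filter q).length ≤ (C.filter p).length := by
  induction C with
  | nil => simp
  | cons a C ih =>
      simp only [List.filter_cons]
      by_cases hq : q a = true
      · simp only [hq, h a hq, if_true, List.length_cons]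
        omega
      · cases hp : p a with
        | true =>
            simp only [eq_false_of_ne_true hq, Bool.false_eq_true, if_false, if_true,
              List.length_cons]
            omega
        | false =>
            simp only [eq_false_of_ne_true hq, hp, Bool.false_eq_true, if_false]
            exact ih

theorem pvUnvis_add_le (C : List Int) (v : PySem.Set Int) (c : Int) :
    pvUnvis C (PySem.Set.add v c) ≤ pvUnvis C v := by
  unfold pvUnvis
  apply pvFilter_mono
  intro a ha
  simp only [Bool.not_eq_true'] at ha ⊢
  cases hv : PySem.Set.contains v a with
  | false => rfl
  | true =>
      have hv' : a ∈ v := by simpa [PySem.Set.contains_iff] using hv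
      have haa : PySem.Set.contains (PySem.Set.add v c) a = true := by
        simp [PySem.Set.contains_iff, PySem.Set.mem_add, hv']
      rw [haa] at ha
      cases ha

theorem pvUnvis_add_lt (C : List Int) (v : PySem.Set Int) (c : Int)
    (hC : c ∈ C) (hv : PySem.Set.contains v c = false) :
    pvUnvis C (PySem.Set.add v c) < pvUnvis C v := by
  unfold pvUnvis
  induction C with
  | nil => cases hC
  | cons a C ih =>
      rcases List.mem_cons.mp hC with rfl | hC'
      · have hcc : PySem.Set.contains (PySem.Set.add v c) c = true := by
          simp [PySem.Set.contains_iff, PySem.Set.mem_add]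
        simp only [List.filter_cons, hv, hcc, Bool.not_false, Bool.not_true, if_true,
          Bool.false_eq_true, if_false, List.length_cons]
        exact Nat.lt_succ_of_le (by simpa [pvUnvis] using pvUnvis_add_le C v c)
      · simp only [List.filter_cons]
        cases ha : PySem.Set.contains (PySem.Set.add v c) a with
        | true =>
            cases hva : PySem.Set.contains v a with
            | true =>
                simp only [ha, hva, Bool.not_true, Bool.false_eq_true, if_false]
                exact ih hC'
            | false =>
                simp only [ha, hva, Bool.not_true, Bool.not_false, if_true,
                  Bool.false_eq_true, if_false, List.length_cons]
                exact Nat.lt_succ_of_le (by simpa [pvUnvis] using pvUnvis_add_le C v c)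
        | false =>
            have hva : PySem.Set.contains v a = false := by
              cases hcv : PySem.Set.contains v a with
              | false => rfl
              | true =>
                  have hcv' : a ∈ v := by simpa [PySem.Set.contains_iff] using hcv
                  have haa : PySem.Set.contains (PySem.Set.add v c) a = true := by
                    simp [PySem.Set.contains_iff, PySem.Set.mem_add, hcv']
                  rw [haa] at ha
                  cases ha
            simp only [ha, hva, Bool.not_false, if_true, List.length_cons]
            exact Nat.succ_lt_succ (ih hC')

-- the new-children fold: each new child is in C and pays 2 from the potential
theorem pvNewKids_bound (cs : List Int) (C : List Int) (v : PySem.Set Int)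
    (hcs : ∀ c ∈ cs, c ∈ C) :
    (pvNewKids cs v).1.length + 2 * pvUnvis C (pvNewKids cs v).2 ≤ 2 * pvUnvis C v := by
  induction cs generalizing v with
  | nil => simp [pvNewKids]
  | cons c cs ih =>
      simp only [pvNewKids, List.foldl_cons]
      by_cases h : PySem.Set.contains v c = true
      · simp only [h, if_true]
        exact ih v (fun x hx => hcs x (List.mem_cons_of_mem _ hx))
      · have h' : PySem.Set.contains v c = false := eq_false_of_ne_true h
        simp only [h', Bool.false_eq_true, if_false, List.nil_append]
        rw [pvFoldB cs [c] (PySem.Set.add v c)]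
        have hstep := pvUnvis_add_lt C v c (hcs c List.mem_cons_self) h'
        have hrec := ih (PySem.Set.add v c) (fun x hx => hcs x (List.mem_cons_of_mem _ hx))
        simp only [List.length_append, List.length_cons, List.length_nil]
        omega

-- tighter form: each new child consumes one whole unit of the potential
theorem pvNewKids_count (cs : List Int) (C : List Int) (v : PySem.Set Int)
    (hcs : ∀ c ∈ cs, c ∈ C) :
    (pvNewKids cs v).1.length + pvUnvis C (pvNewKids cs v).2 ≤ pvUnvis C v := by
  induction cs generalizing v with
  | nil => simp [pvNewKids]
  | cons c cs ih =>
      simp only [pvNewKids, List.foldl_cons]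
      by_cases h : PySem.Set.contains v c = true
      · simp only [h, if_true]
        exact ih v (fun x hx => hcs x (List.mem_cons_of_mem _ hx))
      · have h' : PySem.Set.contains v c = false := eq_false_of_ne_true h
        simp only [h', Bool.false_eq_true, if_false, List.nil_append]
        rw [pvFoldB cs [c] (PySem.Set.add v c)]
        have hstep := pvUnvis_add_lt C v c (hcs c List.mem_cons_self) h'
        have hrec := ih (PySem.Set.add v c) (fun x hx => hcs x (List.mem_cons_of_mem _ hx))
        simp only [List.length_append, List.length_cons, List.length_nil]
        omega

-- children of any node lie within the flattened adjacency lists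
theorem pvKids_sub (lists : List (Int × List Int)) (x c : Int)
    (h : c ∈ PySem.Dict.getD (PySem.Dict.mk lists) x []) :
    c ∈ lists.flatMap Prod.snd := by
  induction lists with
  | nil => simp [PySem.Dict.getD_eq_get?_getD, PySem.Dict.get?] at h
  | cons p rest ih =>
      rw [PySem.Dict.getD_eq_get?_getD] at h ih
      rw [PySem.Dict.get?_mk_cons] at h
      by_cases hk : p.1 == x
      · simp only [hk, if_true, Option.getD_some] at h
        exact List.mem_flatMap.mpr ⟨p, List.mem_cons_self, h⟩
      · simp only [hk, Bool.false_eq_true, if_false] at h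
        exact List.mem_flatMap.mpr (by
          rcases List.mem_flatMap.mp (ih h) with ⟨q, hq, hcq⟩
          exact ⟨q, List.mem_cons_of_mem _ hq, hcq⟩)

-- equation lemmas for the well-founded pvLayered
theorem pvLayered_swap (g : PySem.Dict Int (List Int)) (f : Nat) (y : Int) (ys : List Int)
    (v : PySem.Set Int) (d : Int) :
    pvLayered g (f + 1) [] (y :: ys) v d = pvLayered g (f + 1) (y :: ys) [] v (d + 1) := by
  rw [pvLayered]

theorem pvLayered_step (g : PySem.Dict Int (List Int)) (f : Nat) (x : Int) (rest nxt : List Int)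
    (v : PySem.Set Int) (d : Int) :
    pvLayered g (f + 1) (x :: rest) nxt v d
    = (pvLayered g f rest
        ((PySem.Dict.getD g x []).foldl
          (fun (s : List Int × PySem.Set Int) c =>
            if PySem.Set.contains s.2 c then s
            else (s.1 ++ [c], PySem.Set.add s.2 c)) (nxt, v)).1
        ((PySem.Dict.getD g x []).foldl
          (fun (s : List Int × PySem.Set Int) c =>
            if PySem.Set.contains s.2 c then s
            else (s.1 ++ [c], PySem.Set.add s.2 c)) (nxt, v)).2 d) := by
  rw [pvLayered]

-- the simulation: A's depth-tagged queue always splits as current level ++ next level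
theorem pvSim (lists : List (Int × List Int)) :
    ∀ (f : Nat) (rest nxt : List Int) (v : PySem.Set Int) (d : Int),
    rest.length + nxt.length + 2 * pvUnvis (lists.flatMap Prod.snd) v ≤ f →
    functionLoopA (PySem.Dict.mk lists) f
        (rest.map (fun x => (x, d)) ++ nxt.map (fun x => (x, d + 1))) v d
    = pvLayered (PySem.Dict.mk lists) f rest nxt v d := by
  intro f
  induction f with
  | zero =>
      intro rest nxt v d h
      have h1 : rest = [] := by
        cases rest with | nil => rfl | cons a l => simp at h
      have h2 : nxt = [] := by
        cases nxt with | nil => rfl | cons a l => subst h1; simp at h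
      subst h1; subst h2
      simp [functionLoopA, pvLayered]
  | succ f ih =>
      intro rest nxt v d h
      cases rest with
      | cons x rs =>
          simp only [List.map_cons, List.cons_append, functionLoopA]
          rw [pvLayered_step, pvFoldA, pvFoldB]
          have hkids : ∀ c ∈ PySem.Dict.getD (PySem.Dict.mk lists) x [],
              c ∈ lists.flatMap Prod.snd := fun c hc => pvKids_sub lists x c hc
          have hb := pvNewKids_bound (PySem.Dict.getD (PySem.Dict.mk lists) x []) _ v hkids
          have hmax : max d d = d := by omega
          simp only [hmax]
          have heq : (rs.map (fun x => (x, d)) ++ nxt.map (fun x => (x, d + 1)))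
              ++ ((pvNewKids (PySem.Dict.getD (PySem.Dict.mk lists) x []) v).1).map
                  (fun c => (c, d + 1))
              = rs.map (fun x => (x, d))
                ++ (nxt ++ (pvNewKids (PySem.Dict.getD (PySem.Dict.mk lists) x []) v).1).map
                    (fun x => (x, d + 1)) := by
            simp [List.map_append, List.append_assoc]
          rw [heq]
          apply ih
          simp only [List.length_append, List.length_cons] at h ⊢
          omega
      | nil =>
          cases nxt with
          | nil => simp [functionLoopA, pvLayered]
          | cons y ys =>
              simp only [List.map_nil, List.nil_append, List.map_cons, functionLoopA]
              rw [pvLayered_swap, pvLayered_step, pvFoldA, pvFoldB]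
              have hkids : ∀ c ∈ PySem.Dict.getD (PySem.Dict.mk lists) y [],
                  c ∈ lists.flatMap Prod.snd := fun c hc => pvKids_sub lists y c hc
              have hb := pvNewKids_bound (PySem.Dict.getD (PySem.Dict.mk lists) y []) _ v hkids
              have hmax : max d (d + 1) = d + 1 := by omega
              simp only [hmax, List.nil_append]
              have := ih ys (pvNewKids (PySem.Dict.getD (PySem.Dict.mk lists) y []) v).1
                (pvNewKids (PySem.Dict.getD (PySem.Dict.mk lists) y []) v).2 (d + 1)
                (by simp only [List.length_cons, List.length_nil] at h; omega)
              simpa using this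

-- ===== layered BFS ≡ saturation: membership characterisations =====

-- a whole layered round, node by node
def pvFront (g : PySem.Dict Int (List Int)) : List Int → PySem.Set Int → List Int × PySem.Set Int
  | [], v => ([], v)
  | u :: F, v =>
      let k := pvNewKids (PySem.Dict.getD g u []) v
      let r := pvFront g F k.2
      (k.1 ++ r.1, r.2)

theorem pvNewKids_cons_not_mem (a : Int) (cs : List Int) (v : PySem.Set Int)
    (h : PySem.Set.contains v a = false) :
    pvNewKids (a :: cs) v
    = ([a] ++ (pvNewKids cs (PySem.Set.add v a)).1, (pvNewKids cs (PySem.Set.add v a)).2) := by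
  simp only [pvNewKids, List.foldl_cons, h, Bool.false_eq_true, if_false, List.nil_append]
  exact pvFoldB cs [a] (PySem.Set.add v a)

theorem pvNewKids_mem_set (cs : List Int) (v : PySem.Set Int) (c : Int) :
    c ∈ (pvNewKids cs v).2 ↔ c ∈ v ∨ c ∈ cs := by
  induction cs generalizing v with
  | nil => simp [pvNewKids]
  | cons a cs ih =>
      by_cases h : PySem.Set.contains v a = true
      · have ha : a ∈ v := (PySem.Set.contains_iff v a).mp h
        rw [pvNewKids_cons_mem a cs v h, ih]
        constructor
        · rintro (hv | hc)
          · exact Or.inl hv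
          · exact Or.inr (List.mem_cons_of_mem _ hc)
        · rintro (hv | hc)
          · exact Or.inl hv
          · rcases List.mem_cons.mp hc with rfl | hc'
            · exact Or.inl ha
            · exact Or.inr hc'
      · have h' : PySem.Set.contains v a = false := eq_false_of_ne_true h
        rw [pvNewKids_cons_not_mem a cs v h']
        simp only [ih, PySem.Set.mem_add, List.mem_cons]
        tauto

theorem pvNewKids_mem_list (cs : List Int) (v : PySem.Set Int) (c : Int) :
    c ∈ (pvNewKids cs v).1 ↔ c ∈ cs ∧ c ∉ v := by
  induction cs generalizing v with
  | nil => simp [pvNewKids]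
  | cons a cs ih =>
      by_cases h : PySem.Set.contains v a = true
      · have ha : a ∈ v := (PySem.Set.contains_iff v a).mp h
        rw [pvNewKids_cons_mem a cs v h, ih]
        constructor
        · rintro ⟨hc, hv⟩
          exact ⟨List.mem_cons_of_mem _ hc, hv⟩
        · rintro ⟨hc, hv⟩
          rcases List.mem_cons.mp hc with rfl | hc'
          · exact absurd ha hv
          · exact ⟨hc', hv⟩
      · have h' : PySem.Set.contains v a = false := eq_false_of_ne_true h
        have hav : a ∉ v := fun hav =>
          by rw [(PySem.Set.contains_iff v a).mpr hav] at h'; cases h'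
        rw [pvNewKids_cons_not_mem a cs v h']
        simp only [List.cons_append, List.nil_append, List.mem_cons, ih,
          PySem.Set.mem_add, List.mem_cons]
        constructor
        · rintro (rfl | ⟨hc, hv⟩)
          · exact ⟨Or.inl rfl, hav⟩
          · exact ⟨Or.inr hc, fun hcv => hv (Or.inl hcv)⟩
        · rintro ⟨rfl | hc, hv⟩
          · exact Or.inl rfl
          · by_cases hca : c = a
            · exact Or.inl hca
            · exact Or.inr ⟨hc, fun hk => by rcases hk with hk | hk <;> [exact hv hk; exact hca hk]⟩

theorem pvFront_mem_set (g : PySem.Dict Int (List Int)) (F : List Int) (v : PySem.Set Int) (c : Int) :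
    c ∈ (pvFront g F v).2 ↔ c ∈ v ∨ ∃ u ∈ F, c ∈ PySem.Dict.getD g u [] := by
  induction F generalizing v with
  | nil => simp [pvFront]
  | cons u F ih =>
      simp only [pvFront, ih, pvNewKids_mem_set, List.mem_cons]
      constructor
      · rintro ((hv | hc) | ⟨w, hw, hcw⟩)
        exacts [Or.inl hv, Or.inr ⟨u, Or.inl rfl, hc⟩, Or.inr ⟨w, Or.inr hw, hcw⟩]
      · rintro (hv | ⟨w, (rfl | hw), hcw⟩)
        exacts [Or.inl (Or.inl hv), Or.inl (Or.inr hcw), Or.inr ⟨w, hw, hcw⟩]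

theorem pvFront_mem_list (g : PySem.Dict Int (List Int)) (F : List Int) (v : PySem.Set Int) (c : Int) :
    c ∈ (pvFront g F v).1 ↔ (∃ u ∈ F, c ∈ PySem.Dict.getD g u []) ∧ c ∉ v := by
  induction F generalizing v with
  | nil => simp [pvFront]
  | cons u F ih =>
      simp only [pvFront, List.mem_append, ih, pvNewKids_mem_list, pvNewKids_mem_set,
        List.exists_mem_cons_iff]
      tauto

theorem pvInner_mem (r : PySem.Set Int) (cs : List Int) :
    ∀ (new : PySem.Set Int) (x : Int),
    x ∈ cs.foldl (fun new c =>
        if PySem.Set.contains r c || PySem.Set.contains new c then new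
        else PySem.Set.add new c) new
    ↔ x ∈ new ∨ (x ∈ cs ∧ x ∉ r) := by
  induction cs with
  | nil => simp
  | cons a cs ih =>
      intro new x
      rw [List.foldl_cons]
      by_cases h : (PySem.Set.contains r a || PySem.Set.contains new a) = true
      · simp only [h, if_true, ih]
        rcases Bool.or_eq_true_iff.mp h with hr | hn
        · have har : a ∈ r := (PySem.Set.contains_iff r a).mp hr
          simp only [List.mem_cons]
          constructor
          · rintro (hx | ⟨hc, hv⟩)
            · exact Or.inl hx
            · exact Or.inr ⟨Or.inr hc, hv⟩
          · rintro (hx | ⟨rfl | hc, hv⟩)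
            · exact Or.inl hx
            · exact absurd har hv
            · exact Or.inr ⟨hc, hv⟩
        · have han : a ∈ new := (PySem.Set.contains_iff new a).mp hn
          simp only [List.mem_cons]
          constructor
          · rintro (hx | ⟨hc, hv⟩)
            · exact Or.inl hx
            · exact Or.inr ⟨Or.inr hc, hv⟩
          · rintro (hx | ⟨rfl | hc, hv⟩)
            · exact Or.inl hx
            · exact Or.inl han
            · exact Or.inr ⟨hc, hv⟩
      · have h' := eq_false_of_ne_true h
        have har : a ∉ r := fun har => by
          rw [(PySem.Set.contains_iff r a).mpr har] at h'; simp at h'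
        simp only [h', Bool.false_eq_true, if_false, ih, PySem.Set.mem_add, List.mem_cons]
        constructor
        · rintro ((hx | rfl) | ⟨hc, hv⟩)
          · exact Or.inl hx
          · exact Or.inr ⟨Or.inl rfl, har⟩
          · exact Or.inr ⟨Or.inr hc, hv⟩
        · rintro (hx | ⟨rfl | hc, hv⟩)
          · exact Or.inl (Or.inl hx)
          · exact Or.inl (Or.inr rfl)
          · exact Or.inr ⟨hc, hv⟩

theorem pvOuter_mem (g : PySem.Dict Int (List Int)) (r : PySem.Set Int) (L : List Int) :
    ∀ (new : PySem.Set Int) (x : Int),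
    x ∈ L.foldl (fun new u =>
        (PySem.Dict.getD g u []).foldl (fun new c =>
          if PySem.Set.contains r c || PySem.Set.contains new c then new
          else PySem.Set.add new c) new) new
    ↔ x ∈ new ∨ ∃ u ∈ L, x ∈ PySem.Dict.getD g u [] ∧ x ∉ r := by
  induction L with
  | nil => simp
  | cons u L ih =>
      intro new x
      rw [List.foldl_cons, ih, pvInner_mem]
      simp only [List.exists_mem_cons_iff]
      tauto

theorem pvStepSat_mem (g : PySem.Dict Int (List Int)) (r : PySem.Set Int) (x : Int) :
    x ∈ stepSat g r ↔ (∃ u ∈ r, x ∈ PySem.Dict.getD g u []) ∧ x ∉ r := by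
  unfold stepSat
  rw [pvOuter_mem]
  simp only [PySem.Set.empty]
  constructor
  · rintro (hx | ⟨u, hu, hx, hr⟩)
    · cases hx
    · exact ⟨⟨u, hu, hx⟩, hr⟩
  · rintro ⟨⟨u, hu, hx⟩, hr⟩
    exact Or.inr ⟨u, hu, hx, hr⟩

-- running a whole round of pvLayered
theorem pvRound (g : PySem.Dict Int (List Int)) (F : List Int) :
    ∀ (f : Nat) (nxt : List Int) (v : PySem.Set Int) (d : Int),
    pvLayered g (f + F.length) F nxt v d
    = pvLayered g f [] (nxt ++ (pvFront g F v).1) (pvFront g F v).2 d := by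
  induction F with
  | nil => intro f nxt v d; simp [pvFront]
  | cons u F ih =>
      intro f nxt v d
      have hl : f + (u :: F).length = (f + F.length) + 1 := by
        simp only [List.length_cons]; omega
      rw [hl, pvLayered_step, pvFoldB, ih]
      simp [pvFront, List.append_assoc]

theorem pvLayered_nil (g : PySem.Dict Int (List Int)) (f : Nat) (v : PySem.Set Int) (d : Int) :
    pvLayered g f [] [] v d = d := by
  cases f with
  | zero => rw [pvLayered]
  | succ f => rw [pvLayered]

theorem pvFront_count (lists : List (Int × List Int)) (F : List Int) (v : PySem.Set Int) :
    (pvFront (PySem.Dict.mk lists) F v).1.length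
      + pvUnvis (lists.flatMap Prod.snd) (pvFront (PySem.Dict.mk lists) F v).2
    ≤ pvUnvis (lists.flatMap Prod.snd) v := by
  induction F generalizing v with
  | nil => simp [pvFront]
  | cons u F ih =>
      have hkids : ∀ c ∈ PySem.Dict.getD (PySem.Dict.mk lists) u [],
          c ∈ lists.flatMap Prod.snd := fun c hc => pvKids_sub lists u c hc
      have hk := pvNewKids_count (PySem.Dict.getD (PySem.Dict.mk lists) u [])
        (lists.flatMap Prod.snd) v hkids
      have hrec := ih (pvNewKids (PySem.Dict.getD (PySem.Dict.mk lists) u []) v).2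
      simp only [pvFront, List.length_append]
      omega

theorem pvUnvis_pos (C : List Int) (v : PySem.Set Int) (x : Int)
    (hC : x ∈ C) (hv : x ∉ v) : 1 ≤ pvUnvis C v := by
  have hcv : PySem.Set.contains v x = false := by
    cases h : PySem.Set.contains v x
    · rfl
    · exact absurd ((PySem.Set.contains_iff v x).mp h) hv
  have hx : x ∈ C.filter (fun c => !(PySem.Set.contains v c)) :=
    List.mem_filter.mpr ⟨hC, by simp [hcv, hv]⟩
  have := List.length_pos_of_mem hx
  unfold pvUnvis
  omega

-- the main simulation: layered BFS vs round-by-round saturation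
theorem pvSatEq (lists : List (Int × List Int)) :
    ∀ (f2 f1 : Nat) (F : List Int) (v r : PySem.Set Int) (d : Int),
    (∀ c : Int, c ∈ v ↔ c ∈ r) →
    (∀ u ∈ r, u ∉ F → ∀ c ∈ PySem.Dict.getD (PySem.Dict.mk lists) u [], c ∈ r) →
    (∀ u ∈ F, u ∈ r) →
    F.length + 2 * pvUnvis (lists.flatMap Prod.snd) v ≤ f1 →
    1 + pvUnvis (lists.flatMap Prod.snd) v ≤ f2 →
    pvLayered (PySem.Dict.mk lists) f1 F [] v d = satLoop (PySem.Dict.mk lists) f2 r d := by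
  intro f2
  induction f2 with
  | zero =>
      intro f1 F v r d h1 h2 h3 hf1 hf2
      omega
  | succ f2 ih =>
      intro f1 F v r d h1 h2 h3 hf1 hf2
      have hkey : ∀ x : Int,
          x ∈ (pvFront (PySem.Dict.mk lists) F v).1 ↔ x ∈ stepSat (PySem.Dict.mk lists) r := by
        intro x
        rw [pvFront_mem_list, pvStepSat_mem]
        constructor
        · rintro ⟨⟨u, hu, hx⟩, hxv⟩
          exact ⟨⟨u, h3 u hu, hx⟩, fun hxr => hxv ((h1 x).mpr hxr)⟩
        · rintro ⟨⟨u, hu, hx⟩, hxr⟩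
          by_cases huF : u ∈ F
          · exact ⟨⟨u, huF, hx⟩, fun hxv => hxr ((h1 x).mp hxv)⟩
          · exact absurd (h2 u hu huF x hx) hxr
      have hF1 : F.length ≤ f1 := by omega
      have hrun := pvRound (PySem.Dict.mk lists) F (f1 - F.length) [] v d
      rw [Nat.sub_add_cancel hF1] at hrun
      rw [List.nil_append] at hrun
      have hsat : satLoop (PySem.Dict.mk lists) (f2 + 1) r d
          = if (stepSat (PySem.Dict.mk lists) r).isEmpty then d
            else satLoop (PySem.Dict.mk lists) f2
              (PySem.Set.union r (stepSat (PySem.Dict.mk lists) r)) (d + 1) := rfl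
      rw [hrun, hsat]
      by_cases hempty : (stepSat (PySem.Dict.mk lists) r).isEmpty = true
      · have hnil : (pvFront (PySem.Dict.mk lists) F v).1 = [] := by
          rw [List.eq_nil_iff_forall_not_mem]
          intro x hx
          have hmem := (hkey x).mp hx
          rw [List.isEmpty_iff] at hempty
          rw [hempty] at hmem
          cases hmem
        rw [hnil, pvLayered_nil]
        simp [hempty]
      · have hne : stepSat (PySem.Dict.mk lists) r ≠ [] := by
          intro hn; rw [hn] at hempty; exact hempty rfl
        obtain ⟨x0, hx0⟩ := List.exists_mem_of_ne_nil _ hne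
        have hx0f : x0 ∈ (pvFront (PySem.Dict.mk lists) F v).1 := (hkey x0).mpr hx0
        -- x0 is an unvisited candidate: the potential is positive
        have hx0C : x0 ∈ lists.flatMap Prod.snd ∧ x0 ∉ v := by
          have := (pvFront_mem_list (PySem.Dict.mk lists) F v x0).mp hx0f
          rcases this with ⟨⟨u, _, hu⟩, hxv⟩
          exact ⟨pvKids_sub lists u x0 hu, hxv⟩
        have hpos : 1 ≤ pvUnvis (lists.flatMap Prod.snd) v :=
          pvUnvis_pos _ _ _ hx0C.1 hx0C.2
        have hk1 : 1 ≤ f1 - F.length := by omega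
        obtain ⟨k, hk⟩ : ∃ k, f1 - F.length = k + 1 :=
          ⟨f1 - F.length - 1, by omega⟩
        cases hF : (pvFront (PySem.Dict.mk lists) F v).1 with
        | nil => exact absurd (hF ▸ hx0f) (List.not_mem_nil)
        | cons y ys =>
            rw [hk, pvLayered_swap]
            simp only [hempty, Bool.false_eq_true, if_false]
            rw [← hF]
            -- the count bound for this round
            have hcnt := pvFront_count lists F v
            have hlen1 : 1 ≤ (pvFront (PySem.Dict.mk lists) F v).1.length := by
              rw [hF]; simp
            -- invariants for the next round
            have h1' : ∀ c : Int, c ∈ (pvFront (PySem.Dict.mk lists) F v).2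
                ↔ c ∈ PySem.Set.union r (stepSat (PySem.Dict.mk lists) r) := by
              intro c
              rw [pvFront_mem_set, PySem.Set.mem_union, pvStepSat_mem]
              constructor
              · rintro (hcv | ⟨u, huF, hc⟩)
                · exact Or.inl ((h1 c).mp hcv)
                · by_cases hcr : c ∈ r
                  · exact Or.inl hcr
                  · exact Or.inr ⟨⟨u, h3 u huF, hc⟩, hcr⟩
              · rintro (hcr | ⟨⟨u, hur, hc⟩, hcr⟩)
                · exact Or.inl ((h1 c).mpr hcr)
                · by_cases huF : u ∈ F
                  · exact Or.inr ⟨u, huF, hc⟩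
                  · exact absurd (h2 u hur huF c hc) hcr
            have h3' : ∀ u ∈ (pvFront (PySem.Dict.mk lists) F v).1,
                u ∈ PySem.Set.union r (stepSat (PySem.Dict.mk lists) r) := by
              intro u hu
              exact (PySem.Set.mem_union _ _ _).mpr (Or.inr ((hkey u).mp hu))
            have h2' : ∀ u ∈ PySem.Set.union r (stepSat (PySem.Dict.mk lists) r),
                u ∉ (pvFront (PySem.Dict.mk lists) F v).1 →
                ∀ c ∈ PySem.Dict.getD (PySem.Dict.mk lists) u [],
                c ∈ PySem.Set.union r (stepSat (PySem.Dict.mk lists) r) := by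
              intro u huU huF1 c hc
              by_cases huv : u ∈ v
              · have hur : u ∈ r := (h1 u).mp huv
                by_cases huF : u ∈ F
                · exact (h1' c).mp
                    ((pvFront_mem_set (PySem.Dict.mk lists) F v c).mpr
                      (Or.inr ⟨u, huF, hc⟩))
                · exact (PySem.Set.mem_union _ _ _).mpr (Or.inl (h2 u hur huF c hc))
              · exfalso
                have huv' : u ∈ (pvFront (PySem.Dict.mk lists) F v).2 := (h1' u).mpr huU
                rw [pvFront_mem_set] at huv'
                rcases huv' with hv' | ⟨w, hwF, huw⟩
                · exact huv hv'
                · exact huF1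
                    ((pvFront_mem_list (PySem.Dict.mk lists) F v u).mpr
                      ⟨⟨w, hwF, huw⟩, huv⟩)
            have hmono : pvUnvis (lists.flatMap Prod.snd)
                (pvFront (PySem.Dict.mk lists) F v).2
                + (pvFront (PySem.Dict.mk lists) F v).1.length
                ≤ pvUnvis (lists.flatMap Prod.snd) v := by omega
            exact ih (k + 1) (pvFront (PySem.Dict.mk lists) F v).1
              (pvFront (PySem.Dict.mk lists) F v).2
              (PySem.Set.union r (stepSat (PySem.Dict.mk lists) r)) (d + 1)
              h1' h2' h3'
              (by omega) (by omega)

-- ===== VERDICT (by name: the statement is the Claim_ definition above) =====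
theorem function_spec : Claim_equal_function := by
  intro N lists _ _
  show function N lists = function_alt N lists
  have hu : pvUnvis (lists.flatMap Prod.snd) (PySem.Set.ofList [1])
      ≤ (lists.flatMap Prod.snd).length := by
    unfold pvUnvis; exact List.length_filter_le _ _
  have h := pvSim lists (1 + 2 * (lists.flatMap Prod.snd).length) [1] []
    (PySem.Set.ofList [1]) 0
    (by simp only [List.length_cons, List.length_nil]; omega)
  simp only [List.map_cons, List.map_nil, List.nil_append, List.append_nil] at h
  have h2 := pvSatEq lists (1 + 2 * (lists.flatMap Prod.snd).length)
    (1 + 2 * (lists.flatMap Prod.snd).length) [1]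
    (PySem.Set.ofList [1]) (PySem.Set.ofList [1]) 0
    (fun c => Iff.rfl)
    (by
      intro u hur huF
      exfalso
      apply huF
      have : u = 1 := by simpa [PySem.Set.mem_ofList] using hur
      simp [this])
    (fun u hu => hu)
    (by simp only [List.length_cons, List.length_nil]; omega)
    (by omega)
  show 2 * (N - 1) - functionLoopA (PySem.Dict.mk lists)
      (1 + 2 * (lists.flatMap Prod.snd).length) [(1, 0)] (PySem.Set.ofList [1]) 0
    = 2 * (N - 1) - satLoop (PySem.Dict.mk lists)
      (1 + 2 * (lists.flatMap Prod.snd).length) (PySem.Set.ofList [1]) 0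
  rw [h, h2]
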